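-- pv_equiv track=rewrite | github.com/MrBrantCode/unitest_baseline | mut_generate/mist_train_cf/cf_72049/solution.py | advanced_histogram
-- ===== SOURCE A (Python) =====
-- def advanced_histogram(test):
--     # Track counts
--     count = {}
--     for char in test:
--         if char != ' ':
--             if char.lower() in count:
--                 count[char.lower()] += 1
--             else:
--                 count[char.lower()] = 1
--
--     # Find maximum count
--     max_count = 0
--     for char, cnt in count.items():
--         if cnt > max_count:
--             max_count = cnt
--
--     # Collect chars that have max_count
--     max_chars = {}
--     for char, cnt in count.items():
--         if cnt == max_count:
--             max_chars[char] = cnt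
--
--     return max_chars
-- ===== SOURCE B (Python) =====
-- def advanced_histogram(test):
--     count = {}
--     for char in test:
--         if char != ' ':
--             k = char.lower()
--             count[k] = count.get(k, 0) + 1
--
--     # Inverse index: frequency -> list of (char, count) entries, tracking the max frequency
--     buckets = {}
--     max_count = 0
--     for char, cnt in count.items():
--         buckets.setdefault(cnt, []).append((char, cnt))
--         if cnt > max_count:
--             max_count = cnt
--
--     return dict(buckets.get(max_count, []))
-- ===== Notes on version B (the rewrite author's own statement) =====
-- stated objective: alternative
-- what changed: Instead of A's two rescans of the count dict (one loop to find the max count, a second to refilter), B makes a single pass that builds an inverse frequency->entries bucket table while tracking the running max, then returns the bucket for the max frequency.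
import Mathlib
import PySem

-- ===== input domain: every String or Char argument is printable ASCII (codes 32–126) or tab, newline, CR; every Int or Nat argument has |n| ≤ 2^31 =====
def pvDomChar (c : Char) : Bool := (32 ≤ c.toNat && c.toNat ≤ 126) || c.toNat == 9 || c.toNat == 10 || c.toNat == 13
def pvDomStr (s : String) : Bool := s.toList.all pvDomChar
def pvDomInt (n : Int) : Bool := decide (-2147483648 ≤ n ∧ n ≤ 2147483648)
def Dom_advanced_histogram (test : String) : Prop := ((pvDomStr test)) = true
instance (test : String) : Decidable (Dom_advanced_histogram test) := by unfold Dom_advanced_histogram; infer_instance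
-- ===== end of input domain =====

-- B replaces A's two rescans of the counts (find max, then refilter) by one pass that builds a
-- frequency→entries bucket table together with the running max; objective: alternative.

-- ===== PORT A =====
def advanced_histogram (test : String) : List (String × Int) :=
  -- Track counts
  let count : PySem.Dict String Int :=
    test.toList.foldl (fun count char =>
      if char ≠ ' ' then
        let k : String := String.ofList [PySem.Chars.lowerChar char]
        if count.contains k then
          count.insert k (count.getD k 0 + 1)
        else
          count.insert k 1
      else count) PySem.Dict.empty
  -- Find maximum count
  let max_count : Int :=
    count.items.foldl (fun max_count p => if p.2 > max_count then p.2 else max_count) 0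
  -- Collect chars that have max_count
  let max_chars : PySem.Dict String Int :=
    count.items.foldl (fun d p => if p.2 = max_count then d.insert p.1 p.2 else d) PySem.Dict.empty
  max_chars.items

-- ===== PORT B =====
def advanced_histogram_alt (test : String) : List (String × Int) :=
  let count : PySem.Dict String Int :=
    test.toList.foldl (fun d char =>
      if char ≠ ' ' then
        let k : String := String.ofList [PySem.Chars.lowerChar char]
        d.modify k 0 (· + 1)
      else d) PySem.Dict.empty
  -- one pass over the counts: buckets.setdefault(cnt, []).append((char, cnt)) and the running max
  let s : PySem.Dict Int (List (String × Int)) × Int :=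
    count.items.foldl (fun s p =>
      (s.1.modify p.2 [] (· ++ [p]), if p.2 > s.2 then p.2 else s.2))
      (PySem.Dict.empty, 0)
  (PySem.Dict.ofList (s.1.getD s.2 [])).items

-- ===== PRECONDITION & SPEC =====
def Spec_advanced_histogram (test : String) (out : List (String × Int)) : Prop := out = advanced_histogram_alt test
instance (test : String) (out : List (String × Int)) : Decidable (Spec_advanced_histogram test out) := by unfold Spec_advanced_histogram; infer_instance

-- ===== CLAIM (what is proved, stated in full; the proofs are below) =====
def Claim_equal_advanced_histogram : Prop := ∀ (test : String), Dom_advanced_histogram test → Spec_advanced_histogram test (advanced_histogram test)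

-- ===== LEMMAS AND PROOFS =====

-- A's contains-branch update of the count dict is exactly B's single modify.
lemma insert_branch_eq_modify (d : PySem.Dict String Int) (k : String) :
    (if d.contains k then d.insert k (d.getD k 0 + 1) else d.insert k 1) = d.modify k 0 (· + 1) := by
  show _ = d.insert k (d.getD k 0 + 1)
  by_cases h : d.contains k
  · simp [h]
  · have hc : d.contains k = false := by simpa using h
    rw [if_neg (by simp [hc]), PySem.Dict.getD_of_not_contains]
    · norm_num
    · exact hc

-- The two count-building loops produce the same dict.
lemma count_eq (test : String) :
    test.toList.foldl (fun count char =>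
      if char ≠ ' ' then
        if count.contains (String.ofList [PySem.Chars.lowerChar char]) then
          count.insert (String.ofList [PySem.Chars.lowerChar char])
            (count.getD (String.ofList [PySem.Chars.lowerChar char]) 0 + 1)
        else
          count.insert (String.ofList [PySem.Chars.lowerChar char]) 1
      else count) (PySem.Dict.empty : PySem.Dict String Int)
    = test.toList.foldl (fun d char =>
      if char ≠ ' ' then
        d.modify (String.ofList [PySem.Chars.lowerChar char]) 0 (· + 1)
      else d) PySem.Dict.empty := by
  apply PySem.List.foldl_congr_mem
  intro d c _
  by_cases h : c ≠ ' '
  · simpa [h] using insert_branch_eq_modify d (String.ofList [PySem.Chars.lowerChar c])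
  · simp [h]

-- B's count dict has pairwise-distinct keys.
lemma count_nodup (test : String) :
    ((test.toList.foldl (fun d char =>
      if char ≠ ' ' then
        (d : PySem.Dict String Int).modify (String.ofList [PySem.Chars.lowerChar char]) 0 (· + 1)
      else d) PySem.Dict.empty).items.map Prod.fst).Nodup := by
  rw [PySem.List.foldl_ite_eq_foldl_filter]
  exact PySem.Dict.nodup_keys_foldl_modify_key _ _ _ _ _ PySem.Dict.nodup_keys_empty

-- B's bucket for frequency M holds exactly the count entries whose count is M.
lemma buckets_getD (items : List (String × Int)) (M : Int) :
    (items.foldl (fun d p => d.modify p.2 [] (· ++ [p])) PySem.Dict.empty).getD M []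
    = items.filter (fun p => p.2 == M) := by
  rw [show items.foldl (fun d p => d.modify p.2 [] (· ++ [p])) PySem.Dict.empty
      = (items.map (fun p => (p.2, p))).foldl (fun d q => d.modify q.1 [] (· ++ [q.2])) PySem.Dict.empty
      from by rw [List.foldl_map],
    PySem.Dict.getD_foldl_modify_append]
  simp [List.filter_map, Function.comp_def]

-- Inserting a list of pairs with distinct keys into an empty dict just appends them.
lemma fresh_items (items : List (String × Int)) (hnd : (items.map Prod.fst).Nodup) :
    (items.foldl (fun d p => d.insert p.1 p.2) (PySem.Dict.empty : PySem.Dict String Int)).items = items := by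
  rw [PySem.Dict.items_foldl_insert_fresh (k := Prod.fst) (v := Prod.snd)]
  · simp [show (PySem.Dict.empty : PySem.Dict String Int).items = [] from rfl]
  · intro a _; simp [PySem.Dict.contains_empty]
  · exact hnd

-- Core: A's filter-and-reinsert pass equals B's bucket lookup, for any max value M.
lemma core (items : List (String × Int)) (hnd : (items.map Prod.fst).Nodup) (M : Int) :
    (items.foldl (fun d p => if p.2 = M then d.insert p.1 p.2 else d) PySem.Dict.empty).items
    = (PySem.Dict.ofList ((items.foldl (fun d p => d.modify p.2 [] (· ++ [p])) PySem.Dict.empty).getD M [])).items := by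
  rw [buckets_getD, PySem.List.foldl_ite_eq_foldl_filter]
  have hf : items.filter (fun p => decide (p.2 = M)) = items.filter (fun p => p.2 == M) := by
    apply List.filter_congr; intro x _; rfl
  have hnd' : ((items.filter (fun p => p.2 == M)).map Prod.fst).Nodup :=
    hnd.sublist (List.filter_sublist.map Prod.fst)
  rw [hf, fresh_items _ hnd',
    show PySem.Dict.ofList (items.filter (fun p => p.2 == M))
      = (items.filter (fun p => p.2 == M)).foldl (fun d p => d.insert p.1 p.2) PySem.Dict.empty from rfl,
    fresh_items _ hnd']

-- ===== VERDICT (by name: the statement is the Claim_ definition above) =====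
theorem advanced_histogram_spec : Claim_equal_advanced_histogram := by
  intro test _
  unfold Spec_advanced_histogram
  show advanced_histogram test = advanced_histogram_alt test
  simp only [advanced_histogram, advanced_histogram_alt]
  rw [count_eq]
  rw [PySem.List.foldl_prod_mk
    (f := fun (d : PySem.Dict Int (List (String × Int))) (p : String × Int) => d.modify p.2 [] (· ++ [p]))
    (g := fun (m : Int) (p : String × Int) => if p.2 > m then p.2 else m)]
  exact core _ (count_nodup test) _
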